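-- pv_equiv track=rewrite | github.com/Valentyx/shipwright-ai-agent-challenge | shipwright/mcp_live.py | _capability_keywords
-- ===== SOURCE A (Python) =====
-- def _capability_keywords(required_tool: str, aliases: tuple[str, ...]) -> tuple[str, ...]:
--     if required_tool.startswith("slack.post_"):
--         return ("send", "message")
--     if required_tool.startswith("linear.read_"):
--         return ("issue",)
--     if required_tool == "linear.add_dependency_gap_comment":
--         return ("comment",)
--     if required_tool.startswith("github.read_"):
--         return ("pull", "request")
--     if required_tool == "jira.add_dependency_gap_comment":
--         return ("comment",)
--     if required_tool.startswith("jira.read_"):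
--         return ("issue",)
--     parts = []
--     for alias in aliases:
--         parts.extend(alias.replace(".", "_").split("_"))
--     return tuple(part for part in parts if len(part) > 2)
-- ===== SOURCE B (Python) =====
-- def _capability_keywords(required_tool: str, aliases: tuple[str, ...]) -> tuple[str, ...]:
--     service, _, action = required_tool.partition(".")
--     if service == "slack" and action.startswith("post_"):
--         return ("send", "message")
--     if service in ("linear", "jira"):
--         if action == "add_dependency_gap_comment":
--             return ("comment",)
--         if action.startswith("read_"):
--             return ("issue",)
--     if service == "github" and action.startswith("read_"):
--         return ("pull", "request")
--     words = []
--     for alias in aliases: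
--         word = ""
--         for ch in alias:
--             if ch in "._":
--                 if len(word) > 2:
--                     words.append(word)
--                 word = ""
--             else:
--                 word += ch
--         if len(word) > 2:
--             words.append(word)
--     return tuple(words)
-- ===== Notes on version B (the rewrite author's own statement) =====
-- stated objective: alternative
-- what changed: B splits the tool name once with partition('.') and dispatches on the (service, action) components instead of testing six whole-string prefixes/equalities, and replaces the replace-then-split-then-filter fallback by a single-pass character scanner that cuts words at '.'/'_' and emits them as soon as they are seen.
import Mathlib
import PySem

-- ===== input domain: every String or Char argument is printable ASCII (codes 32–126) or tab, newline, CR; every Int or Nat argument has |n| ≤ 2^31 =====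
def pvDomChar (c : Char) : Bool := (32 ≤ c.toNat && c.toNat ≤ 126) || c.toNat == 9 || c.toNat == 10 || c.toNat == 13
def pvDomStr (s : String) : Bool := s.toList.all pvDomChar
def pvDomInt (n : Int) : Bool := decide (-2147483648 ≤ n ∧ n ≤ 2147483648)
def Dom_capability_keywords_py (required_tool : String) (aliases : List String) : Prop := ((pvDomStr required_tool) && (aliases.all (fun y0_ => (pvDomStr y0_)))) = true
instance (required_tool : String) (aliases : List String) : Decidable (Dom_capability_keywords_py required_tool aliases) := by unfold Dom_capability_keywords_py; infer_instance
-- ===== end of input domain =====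

-- B parses the tool name once into (service, action) with partition(".") and dispatches on the
-- components, and replaces the replace/split fallback by a single-pass character scanner; same values.

-- ===== PORT A =====
-- alias.replace(".", "_").split("_") — exact: Chars.splitOn is Python's str.split with a nonempty separator
def pvAliasParts (al : String) : List String :=
  (PySem.Chars.splitOn (PySem.Str.replace al "." "_").toList ['_']).map String.ofList

def capability_keywords_py (required_tool : String) (aliases : List String) : List String :=
  if PySem.Str.startswith required_tool "slack.post_" then ["send", "message"]
  else if PySem.Str.startswith required_tool "linear.read_" then ["issue"]
  else if required_tool = "linear.add_dependency_gap_comment" then ["comment"]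
  else if PySem.Str.startswith required_tool "github.read_" then ["pull", "request"]
  else if required_tool = "jira.add_dependency_gap_comment" then ["comment"]
  else if PySem.Str.startswith required_tool "jira.read_" then ["issue"]
  else
    let parts := aliases.foldl (fun acc al => acc ++ pvAliasParts al) []
    parts.filter (fun part => 2 < PySem.Str.len part)

-- ===== PORT B =====
-- required_tool.partition(".") ported by hand (PySem has no partition): split at the FIRST '.';
-- exact for a one-char separator (no '.' found → action is ""); the middle component is unused.
def pvPartitionDot (s : String) : List Char × List Char :=
  (s.toList.takeWhile (· ≠ '.'), (s.toList.dropWhile (· ≠ '.')).tail)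

-- the inner character loop: word breaks at '.' or '_', words longer than 2 are emitted as found
def pvScanStep (st : List String × List Char) (c : Char) : List String × List Char :=
  if c = '.' ∨ c = '_' then
    ((if 2 < st.2.length then st.1 ++ [String.ofList st.2] else st.1), [])
  else (st.1, st.2 ++ [c])

def pvScanAlias (out : List String) (al : String) : List String :=
  let st := al.toList.foldl pvScanStep (out, [])
  if 2 < st.2.length then st.1 ++ [String.ofList st.2] else st.1

def capability_keywords_py_alt (required_tool : String) (aliases : List String) : List String :=
  let p := pvPartitionDot required_tool
  if p.1 = "slack".toList ∧ PySem.Chars.startswith p.2 "post_".toList then ["send", "message"]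
  else if (p.1 = "linear".toList ∨ p.1 = "jira".toList) ∧ p.2 = "add_dependency_gap_comment".toList then ["comment"]
  else if (p.1 = "linear".toList ∨ p.1 = "jira".toList) ∧ PySem.Chars.startswith p.2 "read_".toList then ["issue"]
  else if p.1 = "github".toList ∧ PySem.Chars.startswith p.2 "read_".toList then ["pull", "request"]
  else aliases.foldl pvScanAlias []

-- ===== PRECONDITION & SPEC =====
def Spec_capability_keywords_py (required_tool : String) (aliases : List String) (out : List String) : Prop := out = capability_keywords_py_alt required_tool aliases
instance (required_tool : String) (aliases : List String) (out : List String) : Decidable (Spec_capability_keywords_py required_tool aliases out) := by unfold Spec_capability_keywords_py; infer_instance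

-- ===== CLAIM (what is proved, stated in full; the proofs are below) =====
def Claim_equal_capability_keywords_py : Prop := ∀ (required_tool : String) (aliases : List String), Dom_capability_keywords_py required_tool aliases → Spec_capability_keywords_py required_tool aliases (capability_keywords_py required_tool aliases)

-- ===== LEMMAS AND PROOFS =====

-- split a char list at every char satisfying p (proof-side normal form of both tokenizers)
def pvSplitBy (p : Char → Bool) : List Char → List (List Char)
  | [] => [[]]
  | c :: t => if p c then [] :: pvSplitBy p t else (pvSplitBy p t).modifyHead (c :: ·)

lemma pvSplitBy_ne_nil (p : Char → Bool) (l : List Char) : pvSplitBy p l ≠ [] := by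
  induction l with
  | nil => simp [pvSplitBy]
  | cons c t ih =>
    simp only [pvSplitBy]
    split_ifs
    · simp
    · cases h : pvSplitBy p t with
      | nil => exact absurd h ih
      | cons w ws => simp

-- one-step unfoldings of the fuelled PySem loops (all definitional)
lemma pvReplaceGo_zero (old new acc l : List Char) :
    PySem.Chars.replace.go old new 0 l acc = acc.reverse ++ l := rfl
lemma pvReplaceGo_nil (old new acc : List Char) (n : Nat) :
    PySem.Chars.replace.go old new (n+1) [] acc = acc.reverse := rfl
lemma pvReplaceGo_cons (old new : List Char) (n : Nat) (c : Char) (t acc : List Char) :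
    PySem.Chars.replace.go old new (n+1) (c::t) acc
      = if old.isPrefixOf (c::t) then
          PySem.Chars.replace.go old new n (List.drop old.length (c::t)) (new.reverse ++ acc)
        else PySem.Chars.replace.go old new n t (c :: acc) := rfl
lemma pvSplitGo_zero (sep l cur : List Char) (acc : List (List Char)) :
    PySem.Chars.splitOn.go sep 0 l cur acc = ((cur.reverse ++ l) :: acc).reverse := rfl
lemma pvSplitGo_nil (sep cur : List Char) (n : Nat) (acc : List (List Char)) :
    PySem.Chars.splitOn.go sep (n+1) [] cur acc = (cur.reverse :: acc).reverse := rfl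
lemma pvSplitGo_cons (sep : List Char) (n : Nat) (c : Char) (t cur : List Char) (acc : List (List Char)) :
    PySem.Chars.splitOn.go sep (n+1) (c::t) cur acc
      = if sep.isPrefixOf (c::t) then
          PySem.Chars.splitOn.go sep n (List.drop sep.length (c::t)) [] (cur.reverse :: acc)
        else PySem.Chars.splitOn.go sep n t (c :: cur) acc := rfl

lemma pvReplace_go_single (fuel : Nat) : ∀ (l acc : List Char), l.length ≤ fuel →
    PySem.Chars.replace.go ['.'] ['_'] fuel l acc
      = acc.reverse ++ l.map (fun c => if c = '.' then '_' else c) := by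
  induction fuel with
  | zero =>
    intro l acc h
    have hl : l = [] := by cases l <;> simp_all
    subst hl
    rw [pvReplaceGo_zero]; simp
  | succ n ih =>
    intro l acc h
    cases l with
    | nil => rw [pvReplaceGo_nil]; simp
    | cons c t =>
      rw [pvReplaceGo_cons]
      have ht : t.length ≤ n := by simpa using h
      by_cases hc : c = '.'
      · subst hc
        have hpre : (['.'].isPrefixOf ('.' :: t)) = true := by simp [List.isPrefixOf]
        rw [if_pos hpre]
        have hdrop : List.drop (['.'] : List Char).length ('.' :: t) = t := rfl
        have hrev : ((['_'] : List Char).reverse ++ acc) = '_' :: acc := rfl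
        rw [hdrop, hrev, ih t ('_' :: acc) ht]
        simp
      · have hpre : ((['.'].isPrefixOf (c :: t))) = false := by
          simp [List.isPrefixOf, Ne.symm hc]
        rw [if_neg (by simp [hpre])]
        rw [ih t (c :: acc) ht]
        simp [hc]
lemma pvReplace_single (l : List Char) :
    PySem.Chars.replace l ['.'] ['_'] = l.map (fun c => if c = '.' then '_' else c) := by
  have h := pvReplace_go_single l.length l [] (le_refl _)
  simpa [PySem.Chars.replace] using h

lemma pvSplitOn_go_single (fuel : Nat) : ∀ (l cur : List Char) (acc : List (List Char)),
    l.length ≤ fuel →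
    PySem.Chars.splitOn.go ['_'] fuel l cur acc
      = acc.reverse ++ (pvSplitBy (· == '_') l).modifyHead (cur.reverse ++ ·) := by
  induction fuel with
  | zero =>
    intro l cur acc h
    have hl : l = [] := by cases l <;> simp_all
    subst hl
    rw [pvSplitGo_zero]
    simp [pvSplitBy]
  | succ n ih =>
    intro l cur acc h
    cases l with
    | nil => rw [pvSplitGo_nil]; simp [pvSplitBy]
    | cons c t =>
      rw [pvSplitGo_cons]
      have ht : t.length ≤ n := by simpa using h
      by_cases hc : c = '_'
      · subst hc
        have hpre : (['_'].isPrefixOf ('_' :: t)) = true := by simp [List.isPrefixOf]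
        rw [if_pos hpre]
        have hdrop : List.drop (['_'] : List Char).length ('_' :: t) = t := rfl
        rw [hdrop, ih t [] (cur.reverse :: acc) ht]
        simp only [pvSplitBy, BEq.rfl, if_pos, List.reverse_cons, List.append_assoc,
          List.reverse_nil, List.nil_append, List.modifyHead, List.singleton_append]
        cases pvSplitBy (· == '_') t <;> simp
      · have hpre : ((['_'].isPrefixOf (c :: t))) = false := by
          simp [List.isPrefixOf, Ne.symm hc]
        rw [if_neg (by simp [hpre])]
        rw [ih t (c :: cur) acc ht]
        have hne := pvSplitBy_ne_nil (· == '_') t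
        cases hs : pvSplitBy (· == '_') t with
        | nil => exact absurd hs hne
        | cons w ws => simp [pvSplitBy, hc, hs]
lemma pvSplitOn_single (l : List Char) :
    PySem.Chars.splitOn l ['_'] = pvSplitBy (· == '_') l := by
  have h := pvSplitOn_go_single (l.length + 1) l [] [] (by omega)
  have hne := pvSplitBy_ne_nil (· == '_') l
  cases hs : pvSplitBy (· == '_') l with
  | nil => exact absurd hs hne
  | cons w ws => simpa [PySem.Chars.splitOn, hs] using h

lemma pvSplitBy_map (l : List Char) :
    pvSplitBy (· == '_') (l.map (fun c => if c = '.' then '_' else c))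
      = pvSplitBy (fun c => c == '.' || c == '_') l := by
  induction l with
  | nil => simp [pvSplitBy]
  | cons c t ih =>
    by_cases hc : c = '.'
    · subst hc; simp [pvSplitBy, ih]
    · by_cases hu : c = '_'
      · subst hu; simp [pvSplitBy, ih]
      · simp [pvSplitBy, hc, hu, ih]

-- the per-alias parts of A in normal form
lemma pvAliasParts_eq (al : String) :
    pvAliasParts al = (pvSplitBy (fun c => c == '.' || c == '_') al.toList).map String.ofList := by
  unfold pvAliasParts
  have h1 : (PySem.Str.replace al "." "_").toList
      = PySem.Chars.replace al.toList ['.'] ['_'] := by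
    simp [PySem.Str.toList_replace]
  rw [h1, pvReplace_single, pvSplitOn_single, pvSplitBy_map]

def pvFilterLen (ws : List (List Char)) : List String :=
  (ws.filter (fun w => 2 < w.length)).map String.ofList

-- the scanner of B in normal form
lemma pvScan_core (l : List Char) : ∀ (out : List String) (word : List Char),
    (let st := l.foldl pvScanStep (out, word);
     if 2 < st.2.length then st.1 ++ [String.ofList st.2] else st.1)
      = out ++ pvFilterLen ((pvSplitBy (fun c => c == '.' || c == '_') l).modifyHead (word ++ ·)) := by
  induction l with
  | nil =>
    intro out word
    simp only [List.foldl_nil, pvSplitBy, List.modifyHead, pvFilterLen]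
    split_ifs <;> simp_all
  | cons c t ih =>
    intro out word
    by_cases hc : c = '.' ∨ c = '_'
    · have hsep : (c == '.' || c == '_') = true := by
        rcases hc with h | h <;> simp [h]
      simp only [List.foldl_cons, pvScanStep, if_pos hc]
      rw [ih]
      simp only [pvSplitBy, hsep, if_pos]
      have hne := pvSplitBy_ne_nil (fun c => c == '.' || c == '_') t
      cases hs : pvSplitBy (fun c => c == '.' || c == '_') t with
      | nil => exact absurd hs hne
      | cons w ws =>
        simp only [List.modifyHead, List.nil_append, List.append_nil, pvFilterLen,
          List.filter_cons]
        split_ifs <;> simp_all [pvFilterLen] <;> omega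
    · have hsep : (c == '.' || c == '_') = false := by
        push_neg at hc
        simp [hc.1, hc.2]
      simp only [List.foldl_cons, pvScanStep, if_neg hc]
      rw [ih]
      simp only [pvSplitBy, hsep, Bool.false_eq_true, if_false]
      have hne := pvSplitBy_ne_nil (fun c => c == '.' || c == '_') t
      cases hs : pvSplitBy (fun c => c == '.' || c == '_') t with
      | nil => exact absurd hs hne
      | cons w ws => simp [List.append_assoc]
lemma pvScanAlias_eq (out : List String) (al : String) :
    pvScanAlias out al
      = out ++ (pvAliasParts al).filter (fun part => 2 < PySem.Str.len part) := by
  unfold pvScanAlias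
  rw [pvScan_core]
  rw [pvAliasParts_eq]
  have hne := pvSplitBy_ne_nil (fun c => c == '.' || c == '_') al.toList
  cases hs : pvSplitBy (fun c => c == '.' || c == '_') al.toList with
  | nil => exact absurd hs hne
  | cons w ws =>
    have hcond : ((fun part => decide (2 < PySem.Str.len part)) ∘ String.ofList)
        = (fun v : List Char => decide (2 < v.length)) := by
      funext v
      have h := Iff.rfl.mpr (show (2 : Int) < v.length ↔ 2 < v.length by exact_mod_cast Iff.rfl)
      simp [PySem.Str.len]
    simp only [List.modifyHead, List.nil_append, pvFilterLen]
    rw [List.filter_map, hcond]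

lemma pvFallback_eq (als : List String) : ∀ (acc : List String),
    (als.foldl (fun a al => a ++ pvAliasParts al) acc).filter (fun part => 2 < PySem.Str.len part)
      = als.foldl pvScanAlias (acc.filter (fun part => 2 < PySem.Str.len part)) := by
  induction als with
  | nil => intro acc; simp
  | cons al t ih =>
    intro acc
    simp only [List.foldl_cons]
    rw [ih (acc ++ pvAliasParts al)]
    rw [List.filter_append, pvScanAlias_eq]

-- partition vs prefix/equality tests on the undivided string
lemma pvTakeDrop_dot (p q : List Char) (hp : ∀ c ∈ p, c ≠ '.') :
    (p ++ '.' :: q).takeWhile (· ≠ '.') = p ∧ (p ++ '.' :: q).dropWhile (· ≠ '.') = '.' :: q := by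
  induction p with
  | nil => simp
  | cons a p ih =>
    have ha : a ≠ '.' := hp a (by simp)
    have h2 := ih (fun c hc => hp c (by simp [hc]))
    refine ⟨?_, ?_⟩
    · rw [List.cons_append, List.takeWhile_cons_of_pos (by simp [ha]), h2.1]
    · rw [List.cons_append, List.dropWhile_cons_of_pos (by simp [ha]), h2.2]

lemma pvDropHead {A : Type} (p : A → Bool) : ∀ (l : List A) (c : A) (r : List A),
    l.dropWhile p = c :: r → p c = false := by
  intro l
  induction l with
  | nil => intro c r h; simp [List.dropWhile] at h
  | cons a t ih =>
    intro c r h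
    by_cases hpa : p a
    · rw [List.dropWhile_cons_of_pos hpa] at h
      exact ih c r h
    · rw [List.dropWhile_cons_of_neg hpa] at h
      injection h with h1 h2
      subst h1
      simpa using hpa

lemma pvPrefix_iff (l p q : List Char) (hp : ∀ c ∈ p, c ≠ '.') (hq : q ≠ []) :
    PySem.Chars.startswith l (p ++ '.' :: q) = true
      ↔ l.takeWhile (· ≠ '.') = p ∧ PySem.Chars.startswith (l.dropWhile (· ≠ '.')).tail q = true := by
  rw [PySem.Chars.startswith_iff, PySem.Chars.startswith_iff]
  constructor
  · rintro ⟨r, rfl⟩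
    have h := pvTakeDrop_dot p (q ++ r) hp
    refine ⟨?_, ?_⟩
    · simpa only [List.append_assoc, List.cons_append] using h.1
    · have h2 := h.2
      simp only [List.append_assoc, List.cons_append] at h2 ⊢
      rw [h2]
      exact ⟨r, rfl⟩
  · rintro ⟨h1, h2⟩
    have hd : l.dropWhile (· ≠ '.') ≠ [] := by
      intro h0
      rw [h0] at h2
      simp only [List.tail_nil] at h2
      exact hq (List.prefix_nil.mp h2)
    cases hdw : l.dropWhile (· ≠ '.') with
    | nil => exact absurd hdw hd
    | cons c r =>
      have hc := pvDropHead _ l c r hdw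
      simp only [decide_not, Bool.not_eq_false', decide_eq_true_eq] at hc
      subst hc
      have hl : l = l.takeWhile (· ≠ '.') ++ l.dropWhile (· ≠ '.') :=
        (List.takeWhile_append_dropWhile).symm
      rw [hdw, h1] at hl
      rw [hdw] at h2
      simp only [List.tail_cons] at h2
      obtain ⟨r', rfl⟩ := h2
      exact ⟨r', by rw [hl]; simp⟩

lemma pvEq_iff (l p q : List Char) (hp : ∀ c ∈ p, c ≠ '.') (hq : q ≠ []) :
    l = p ++ '.' :: q ↔ l.takeWhile (· ≠ '.') = p ∧ (l.dropWhile (· ≠ '.')).tail = q := by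
  constructor
  · intro h
    subst h
    have h := pvTakeDrop_dot p q hp
    exact ⟨h.1, by rw [h.2]; rfl⟩
  · rintro ⟨h1, h2⟩
    have hd : l.dropWhile (· ≠ '.') ≠ [] := by
      intro h0
      rw [h0] at h2
      simp only [List.tail_nil] at h2
      exact hq h2.symm
    cases hdw : l.dropWhile (· ≠ '.') with
    | nil => exact absurd hdw hd
    | cons c r =>
      have hc := pvDropHead _ l c r hdw
      simp only [decide_not, Bool.not_eq_false', decide_eq_true_eq] at hc
      subst hc
      have hl : l = l.takeWhile (· ≠ '.') ++ l.dropWhile (· ≠ '.') :=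
        (List.takeWhile_append_dropWhile).symm
      rw [hdw, h1] at hl
      rw [hdw] at h2
      simp only [List.tail_cons] at h2
      rw [hl, h2]

lemma pvNoDot (s : String) (h : s.toList.all (· ≠ '.') = true) : ∀ c ∈ s.toList, c ≠ '.' :=
  fun c hc => by simpa using List.all_eq_true.mp h c hc

-- ===== VERDICT (by name: the statement is the Claim_ definition above) =====
theorem capability_keywords_py_spec : Claim_equal_capability_keywords_py := by
  intro rt aliases _
  unfold Spec_capability_keywords_py
  have hfall : ∀ als : List String,
      (als.foldl (fun acc al => acc ++ pvAliasParts al) []).filter (fun part => 2 < PySem.Str.len part)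
        = als.foldl pvScanAlias [] := by
    intro als
    simpa using pvFallback_eq als []
  have eSlack : ("slack.post_".toList : List Char) = "slack".toList ++ '.' :: "post_".toList := rfl
  have eLinR : ("linear.read_".toList : List Char) = "linear".toList ++ '.' :: "read_".toList := rfl
  have eLinA : ("linear.add_dependency_gap_comment".toList : List Char)
      = "linear".toList ++ '.' :: "add_dependency_gap_comment".toList := rfl
  have eGit : ("github.read_".toList : List Char) = "github".toList ++ '.' :: "read_".toList := rfl
  have eJirA : ("jira.add_dependency_gap_comment".toList : List Char)
      = "jira".toList ++ '.' :: "add_dependency_gap_comment".toList := rfl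
  have eJirR : ("jira.read_".toList : List Char) = "jira".toList ++ '.' :: "read_".toList := rfl
  have hA1 : PySem.Str.startswith rt "slack.post_" = true
      ↔ rt.toList.takeWhile (· ≠ '.') = "slack".toList
        ∧ PySem.Chars.startswith (rt.toList.dropWhile (· ≠ '.')).tail "post_".toList = true := by
    rw [show PySem.Str.startswith rt "slack.post_"
          = PySem.Chars.startswith rt.toList "slack.post_".toList by simp, eSlack]
    exact pvPrefix_iff _ _ _ (pvNoDot _ rfl) (by simp)
  have hA2 : PySem.Str.startswith rt "linear.read_" = true
      ↔ rt.toList.takeWhile (· ≠ '.') = "linear".toList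
        ∧ PySem.Chars.startswith (rt.toList.dropWhile (· ≠ '.')).tail "read_".toList = true := by
    rw [show PySem.Str.startswith rt "linear.read_"
          = PySem.Chars.startswith rt.toList "linear.read_".toList by simp, eLinR]
    exact pvPrefix_iff _ _ _ (pvNoDot _ rfl) (by simp)
  have hA3 : rt = "linear.add_dependency_gap_comment"
      ↔ rt.toList.takeWhile (· ≠ '.') = "linear".toList
        ∧ (rt.toList.dropWhile (· ≠ '.')).tail = "add_dependency_gap_comment".toList := by
    rw [show (rt = "linear.add_dependency_gap_comment")
          ↔ rt.toList = "linear.add_dependency_gap_comment".toList from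
        ⟨fun h => by rw [h], fun h => String.toList_inj.mp h⟩, eLinA]
    exact pvEq_iff _ _ _ (pvNoDot _ rfl) (by simp)
  have hA4 : PySem.Str.startswith rt "github.read_" = true
      ↔ rt.toList.takeWhile (· ≠ '.') = "github".toList
        ∧ PySem.Chars.startswith (rt.toList.dropWhile (· ≠ '.')).tail "read_".toList = true := by
    rw [show PySem.Str.startswith rt "github.read_"
          = PySem.Chars.startswith rt.toList "github.read_".toList by simp, eGit]
    exact pvPrefix_iff _ _ _ (pvNoDot _ rfl) (by simp)
  have hA5 : rt = "jira.add_dependency_gap_comment"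
      ↔ rt.toList.takeWhile (· ≠ '.') = "jira".toList
        ∧ (rt.toList.dropWhile (· ≠ '.')).tail = "add_dependency_gap_comment".toList := by
    rw [show (rt = "jira.add_dependency_gap_comment")
          ↔ rt.toList = "jira.add_dependency_gap_comment".toList from
        ⟨fun h => by rw [h], fun h => String.toList_inj.mp h⟩, eJirA]
    exact pvEq_iff _ _ _ (pvNoDot _ rfl) (by simp)
  have hA6 : PySem.Str.startswith rt "jira.read_" = true
      ↔ rt.toList.takeWhile (· ≠ '.') = "jira".toList
        ∧ PySem.Chars.startswith (rt.toList.dropWhile (· ≠ '.')).tail "read_".toList = true := by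
    rw [show PySem.Str.startswith rt "jira.read_"
          = PySem.Chars.startswith rt.toList "jira.read_".toList by simp, eJirR]
    exact pvPrefix_iff _ _ _ (pvNoDot _ rfl) (by simp)
  have hAddRead : PySem.Chars.startswith ("add_dependency_gap_comment".toList) ("read_".toList) = false := rfl
  simp only [capability_keywords_py, capability_keywords_py_alt, pvPartitionDot]
  by_cases h1 : PySem.Str.startswith rt "slack.post_" = true
  · obtain ⟨hT, hD⟩ := hA1.mp h1
    rw [if_pos h1, if_pos ⟨hT, hD⟩]
  · rw [if_neg h1, if_neg (fun hc => h1 (hA1.mpr hc))]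
    by_cases h2 : PySem.Str.startswith rt "linear.read_" = true
    · obtain ⟨hT, hD⟩ := hA2.mp h2
      rw [if_pos h2]
      rw [if_neg (by rintro ⟨_, hDa⟩; rw [hDa] at hD; rw [hAddRead] at hD; exact absurd hD (by simp))]
      rw [if_pos ⟨Or.inl hT, hD⟩]
    · rw [if_neg h2]
      by_cases h3 : rt = "linear.add_dependency_gap_comment"
      · obtain ⟨hT, hD⟩ := hA3.mp h3
        rw [if_pos h3, if_pos ⟨Or.inl hT, hD⟩]
      · rw [if_neg h3]
        by_cases h4 : PySem.Str.startswith rt "github.read_" = true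
        · obtain ⟨hT, hD⟩ := hA4.mp h4
          rw [if_pos h4]
          rw [if_neg (by rintro ⟨hTo, _⟩; rcases hTo with hTo | hTo <;> rw [hT] at hTo <;> exact absurd hTo (by simp))]
          rw [if_neg (by rintro ⟨hTo, _⟩; rcases hTo with hTo | hTo <;> rw [hT] at hTo <;> exact absurd hTo (by simp))]
          rw [if_pos ⟨hT, hD⟩]
        · rw [if_neg h4]
          by_cases h5 : rt = "jira.add_dependency_gap_comment"
          · obtain ⟨hT, hD⟩ := hA5.mp h5
            rw [if_pos h5, if_pos ⟨Or.inr hT, hD⟩]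
          · rw [if_neg h5]
            by_cases h6 : PySem.Str.startswith rt "jira.read_" = true
            · obtain ⟨hT, hD⟩ := hA6.mp h6
              rw [if_pos h6]
              rw [if_neg (by rintro ⟨_, hDa⟩; rw [hDa] at hD; rw [hAddRead] at hD; exact absurd hD (by simp))]
              rw [if_pos ⟨Or.inr hT, hD⟩]
            · rw [if_neg h6]
              have hB2 : ¬ ((rt.toList.takeWhile (· ≠ '.') = "linear".toList ∨
                  rt.toList.takeWhile (· ≠ '.') = "jira".toList) ∧
                  (rt.toList.dropWhile (· ≠ '.')).tail = "add_dependency_gap_comment".toList) := by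
                rintro ⟨hTo | hTo, hDa⟩
                · exact h3 (hA3.mpr ⟨hTo, hDa⟩)
                · exact h5 (hA5.mpr ⟨hTo, hDa⟩)
              have hB3 : ¬ ((rt.toList.takeWhile (· ≠ '.') = "linear".toList ∨
                  rt.toList.takeWhile (· ≠ '.') = "jira".toList) ∧
                  PySem.Chars.startswith (rt.toList.dropWhile (· ≠ '.')).tail "read_".toList = true) := by
                rintro ⟨hTo | hTo, hDa⟩
                · exact h2 (hA2.mpr ⟨hTo, hDa⟩)
                · exact h6 (hA6.mpr ⟨hTo, hDa⟩)
              rw [if_neg hB2, if_neg hB3, if_neg (fun hc => h4 (hA4.mpr hc))]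
              exact hfall aliases
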